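-- pv_equiv track=rewrite | github.com/Leapense/problems | 22160번： Параллелепипед/Параллелепипед.py | can_form_parallelepiped
-- ===== SOURCE A (Python) =====
-- def can_form_parallelepiped(matchsticks):
--     # Count frequency of each matchstick length
--     length_counts = {}
--     for length in matchsticks:
--         if length in length_counts:
--             length_counts[length] += 1
--         else:
--             length_counts[length] = 1
--
--     # Collect the counts in a list
--     counts = list(length_counts.values())
--
--     # Check if we have exactly three lengths each occurring 4 times
--     if sorted(counts) == [4, 4, 4]:
--         return "yes"
--     else:
--         return "no"
-- ===== SOURCE B (Python) =====
-- def can_form_parallelepiped(matchsticks):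
--     # Sort once and check positionally: three consecutive blocks of four equal
--     # values with differing boundaries, instead of building a frequency table.
--     if len(matchsticks) != 12:
--         return "no"
--     s = sorted(matchsticks)
--     if s[0] == s[3] and s[4] == s[7] and s[8] == s[11] and s[3] != s[4] and s[7] != s[8]:
--         return "yes"
--     return "no"
-- ===== Notes on version B (the rewrite author's own statement) =====
-- stated objective: faster
-- what changed: B replaces A's Python-level dict frequency loop (count each length, then compare the sorted count list) by a single library sort of the sticks followed by a positional check that the sorted list is three consecutive blocks of four equal values with distinct block boundaries.
import Mathlib
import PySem

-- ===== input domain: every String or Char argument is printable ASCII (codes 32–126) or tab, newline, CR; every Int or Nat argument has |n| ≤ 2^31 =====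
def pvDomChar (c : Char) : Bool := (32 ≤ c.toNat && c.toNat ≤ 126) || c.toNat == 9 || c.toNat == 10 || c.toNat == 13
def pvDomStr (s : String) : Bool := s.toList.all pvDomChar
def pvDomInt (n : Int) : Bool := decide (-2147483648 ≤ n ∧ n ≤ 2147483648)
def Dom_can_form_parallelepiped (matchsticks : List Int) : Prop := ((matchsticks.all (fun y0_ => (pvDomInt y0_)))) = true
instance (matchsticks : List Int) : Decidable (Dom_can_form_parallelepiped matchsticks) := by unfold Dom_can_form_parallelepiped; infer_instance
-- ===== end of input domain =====

-- B sorts the sticks once and checks the sorted list positionally (three blocks of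
-- four equal values with distinct boundaries) instead of A's dict frequency count.

-- ===== PORT A =====
def can_form_parallelepiped (matchsticks : List Int) : String :=
  -- length_counts = {} ; for length in matchsticks: …
  let length_counts : PySem.Dict Int Int :=
    matchsticks.foldl
      (fun d length =>
        if d.contains length then d.insert length (d.getD length 0 + 1)
        else d.insert length 1)
      PySem.Dict.empty
  let counts : List Int := length_counts.values
  if PySem.List.sorted counts (fun x => x) false = [4, 4, 4] then "yes" else "no"

-- ===== PORT B =====
def can_form_parallelepiped_alt (matchsticks : List Int) : String :=
  if matchsticks.length ≠ 12 then "no"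
  else
    let s := PySem.List.sorted matchsticks (fun x => x) false
    -- every index below is in range because s.length = 12, so pyGetD's default
    -- is never used and s[i] is exact Python indexing here
    if PySem.List.pyGetD s 0 0 = PySem.List.pyGetD s 3 0 ∧
       PySem.List.pyGetD s 4 0 = PySem.List.pyGetD s 7 0 ∧
       PySem.List.pyGetD s 8 0 = PySem.List.pyGetD s 11 0 ∧
       PySem.List.pyGetD s 3 0 ≠ PySem.List.pyGetD s 4 0 ∧
       PySem.List.pyGetD s 7 0 ≠ PySem.List.pyGetD s 8 0 then "yes"
    else "no"

-- ===== PRECONDITION & SPEC =====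
def Spec_can_form_parallelepiped (matchsticks : List Int) (out : String) : Prop := out = can_form_parallelepiped_alt matchsticks
instance (matchsticks : List Int) (out : String) : Decidable (Spec_can_form_parallelepiped matchsticks out) := by unfold Spec_can_form_parallelepiped; infer_instance

-- ===== CLAIM (what is proved, stated in full; the proofs are below) =====
def Claim_equal_can_form_parallelepiped : Prop := ∀ (matchsticks : List Int), Dom_can_form_parallelepiped matchsticks → Spec_can_form_parallelepiped matchsticks (can_form_parallelepiped matchsticks)

-- ===== LEMMAS AND PROOFS =====

-- the common characterisation: sorted(l) is three blocks of four copies of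
-- strictly increasing values
def pvThreeBlocks (l : List Int) : Prop :=
  ∃ a b c : Int, a < b ∧ b < c ∧
    (PySem.List.sorted l (fun x => x) false) =
      List.replicate 4 a ++ List.replicate 4 b ++ List.replicate 4 c

-- A's loop body is extensionally the counter step
lemma pv_step_eq :
    (fun (d : PySem.Dict Int Int) x =>
      if d.contains x then d.insert x (d.getD x 0 + 1) else d.insert x 1) =
    (fun (d : PySem.Dict Int Int) x => d.insert x (d.getD x 0 + 1)) := by
  funext d x
  by_cases h : d.contains x
  · simp [h]
  · rw [PySem.Dict.getD_of_not_contains d 0 (by simpa using h)]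
    simp [h]

-- A's condition sorted(counts) == [4,4,4] as "three distinct values, each four times"
lemma pv_P_iff (l : List Int) :
    (PySem.List.sorted ((PySem.Dict.counter l).values) (fun x => x) false = [4, 4, 4]) ↔
    ((PySem.Set.ofList l).length = 3 ∧ ∀ k ∈ PySem.Set.ofList l, l.count k = 4) := by
  have hvals : (PySem.Dict.counter l).values =
      (PySem.Set.ofList l).map (fun k => (l.count k : Int)) := by
    simp only [PySem.Dict.values, PySem.Dict.items_counter, List.map_map]
    rfl
  have h344 : PySem.List.sorted ([4,4,4] : List Int) (fun x => x) false = [4,4,4] := by decide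
  rw [show ([4,4,4] : List Int) = PySem.List.sorted ([4,4,4] : List Int) (fun x => x) false from h344.symm,
      PySem.List.sorted_id_eq_sorted_id_iff_perm, hvals]
  rw [show ([4,4,4] : List Int) = List.replicate 3 4 from rfl, List.perm_replicate, List.eq_replicate_iff]
  simp only [List.length_map, List.forall_mem_map]
  constructor
  · rintro ⟨h1, h2⟩
    exact ⟨h1, fun k hk => by have := h2 k hk; exact_mod_cast this⟩
  · rintro ⟨h1, h2⟩
    exact ⟨h1, fun k hk => by exact_mod_cast h2 k hk⟩

-- A answers "yes" iff pvThreeBlocks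
lemma pv_A_yes_iff (l : List Int) :
    (PySem.List.sorted ((PySem.Dict.counter l).values) (fun x => x) false = [4, 4, 4]) ↔
    pvThreeBlocks l := by
  rw [pv_P_iff]
  constructor
  · rintro ⟨hlen, hcnt⟩
    set u := PySem.List.sorted (PySem.Set.ofList l) (fun x => x) false with hu
    have hul : u.length = 3 := by rw [hu, PySem.List.length_sorted]; exact hlen
    have hpw := PySem.List.sorted_ofList_pairwise_lt (xs := l)
    rw [← hu] at hpw
    have humem : ∀ x, x ∈ u ↔ x ∈ l := by
      intro x
      rw [hu, PySem.List.mem_sorted, PySem.Set.mem_ofList]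
    obtain ⟨a, b, c, huabc⟩ : ∃ a b c, u = [a, b, c] := by
      match u, hul with
      | [a, b, c], _ => exact ⟨a, b, c, rfl⟩
    rw [huabc] at hpw humem
    have hab : a < b := by simp at hpw; exact hpw.1.1
    have hbc : b < c := by simp at hpw; exact hpw.2
    have hca : ∀ x ∈ ([a,b,c] : List Int), l.count x = 4 := fun x hx =>
      hcnt x (by rw [PySem.Set.mem_ofList]; exact (humem x).mp hx)
    have hperm : l.Perm (List.replicate 4 a ++ List.replicate 4 b ++ List.replicate 4 c) := by
      rw [List.perm_iff_count]
      intro x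
      by_cases hx : x ∈ ([a,b,c] : List Int)
      · have h4 := hca x hx
        simp only [List.count_append, List.count_replicate]
        simp at hx
        rcases hx with rfl | rfl | rfl
        · rw [h4]; simp [hab.ne', (hab.trans hbc).ne']
        · rw [h4]; simp [hab.ne, hbc.ne']
        · rw [h4]; simp [(hab.trans hbc).ne, hbc.ne]
      · have hxl : x ∉ l := fun hh => hx ((humem x).mpr hh)
        rw [List.count_eq_zero.mpr hxl]
        simp only [List.count_append, List.count_replicate]
        simp at hx
        simp [Ne.symm hx.1, Ne.symm hx.2.1, Ne.symm hx.2.2]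
    refine ⟨a, b, c, hab, hbc, ?_⟩
    refine PySem.List.sorted_id_eq_of_perm_of_pairwise _ _ hperm.symm ?_
    simp
    omega
  · rintro ⟨a, b, c, hab, hbc, hs⟩
    have hperm : (List.replicate 4 a ++ List.replicate 4 b ++ List.replicate 4 c).Perm l := by
      rw [← hs]; exact PySem.List.sorted_perm l (fun x => x) false
    have hmem : ∀ x, x ∈ l ↔ (x = a ∨ x = b ∨ x = c) := by
      intro x
      rw [← hperm.mem_iff]
      simp
    have hcount : ∀ x, l.count x = (List.replicate 4 a ++ List.replicate 4 b ++ List.replicate 4 c).count x :=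
      fun x => (hperm.count_eq x).symm
    have hnd : ([a, b, c] : List Int).Nodup := by
      simp [hab.ne, hbc.ne, (hab.trans hbc).ne]
    have hpermS : (PySem.Set.ofList l).Perm [a, b, c] := by
      rw [List.perm_ext_iff_of_nodup (PySem.Set.nodup_ofList l) hnd]
      intro x
      rw [PySem.Set.mem_ofList, hmem]
      simp
    constructor
    · simpa using hpermS.length_eq
    · intro k hk
      have hkabc : k = a ∨ k = b ∨ k = c := (hmem k).mp (by rwa [← PySem.Set.mem_ofList (xs := l)])
      rw [hcount]
      simp only [List.count_append, List.count_replicate]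
      rcases hkabc with rfl | rfl | rfl
      · simp [hab.ne', (hab.trans hbc).ne']
      · simp [hab.ne, hbc.ne']
      · simp [(hab.trans hbc).ne, hbc.ne]

-- B answers "yes" iff pvThreeBlocks
lemma pv_B_yes_iff (l : List Int) :
    (l.length = 12 ∧
     (PySem.List.pyGetD (PySem.List.sorted l (fun x => x) false) 0 0 = PySem.List.pyGetD (PySem.List.sorted l (fun x => x) false) 3 0 ∧
      PySem.List.pyGetD (PySem.List.sorted l (fun x => x) false) 4 0 = PySem.List.pyGetD (PySem.List.sorted l (fun x => x) false) 7 0 ∧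
      PySem.List.pyGetD (PySem.List.sorted l (fun x => x) false) 8 0 = PySem.List.pyGetD (PySem.List.sorted l (fun x => x) false) 11 0 ∧
      PySem.List.pyGetD (PySem.List.sorted l (fun x => x) false) 3 0 ≠ PySem.List.pyGetD (PySem.List.sorted l (fun x => x) false) 4 0 ∧
      PySem.List.pyGetD (PySem.List.sorted l (fun x => x) false) 7 0 ≠ PySem.List.pyGetD (PySem.List.sorted l (fun x => x) false) 8 0)) ↔
    pvThreeBlocks l := by
  constructor
  · rintro ⟨hlen, h03, h47, h811, h34, h78⟩
    set s := PySem.List.sorted l (fun x => x) false with hsdef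
    have hslen : s.length = 12 := by rw [hsdef, PySem.List.length_sorted]; exact hlen
    have hget : ∀ (i : Nat) (h : i < 12), PySem.List.pyGetD s (i : Int) 0 = s[i]'(by rw [hslen]; exact h) := by
      intro i hi
      rw [PySem.List.pyGetD_eq_getElem s 0 (by exact_mod_cast Nat.zero_le i) (by rw [hslen]; exact_mod_cast hi)]
      simp
    have g0 := hget 0 (by norm_num); have g3 := hget 3 (by norm_num)
    have g4 := hget 4 (by norm_num); have g7 := hget 7 (by norm_num)
    have g8 := hget 8 (by norm_num); have g11 := hget 11 (by norm_num)
    norm_num at g0 g3 g4 g7 g8 g11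
    rw [g0, g3] at h03; rw [g4, g7] at h47; rw [g8, g11] at h811
    rw [g3, g4] at h34; rw [g7, g8] at h78
    have mono : ∀ (p q : Nat) (hpq : p ≤ q) (hq : q < 12),
        s[p]'(by rw [hslen]; omega) ≤ s[q]'(by rw [hslen]; exact hq) := by
      intro p q hpq hq
      exact PySem.List.sorted_id_getElem_mono l hpq (by rw [PySem.List.length_sorted, hlen]; exact_mod_cast hq)
    refine ⟨s[0], s[4], s[8], ?_, ?_, ?_⟩
    · exact lt_of_le_of_ne (h03 ▸ mono 3 4 (by norm_num) (by norm_num)) (h03 ▸ h34)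
    · exact lt_of_le_of_ne (h47 ▸ mono 7 8 (by norm_num) (by norm_num)) (h47 ▸ h78)
    · show s = _
      apply List.ext_getElem (by simp [hslen])
      intro i hi _
      have hi12 : i < 12 := by omega
      interval_cases i <;>
        simp only [List.replicate, List.getElem_cons_zero, List.getElem_cons_succ,
          List.cons_append, List.nil_append] <;>
        first
          | rfl
          | exact h03.symm
          | exact h47.symm
          | exact h811.symm
          | (exact le_antisymm (h03 ▸ mono _ 3 (by norm_num) (by norm_num))
              (mono 0 _ (by norm_num) (by norm_num)))
          | (exact le_antisymm (h47 ▸ mono _ 7 (by norm_num) (by norm_num))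
              (mono 4 _ (by norm_num) (by norm_num)))
          | (exact le_antisymm (h811 ▸ mono _ 11 (by norm_num) (by norm_num))
              (mono 8 _ (by norm_num) (by norm_num)))
  · rintro ⟨a, b, c, hab, hbc, hs⟩
    have hrep : (List.replicate 4 a ++ List.replicate 4 b ++ List.replicate 4 c) =
        [a,a,a,a,b,b,b,b,c,c,c,c] := rfl
    rw [hrep] at hs
    have hlen : l.length = 12 := by
      have := PySem.List.length_sorted l (fun x => x) false
      rw [hs] at this; simpa using this.symm
    refine ⟨hlen, ?_⟩
    rw [hs]
    simp [PySem.List.pyGetD, PySem.List.pyGet?, PySem.List.pyIdx?, hab.ne, hbc.ne]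

-- ===== VERDICT (by name: the statement is the Claim_ definition above) =====
theorem can_form_parallelepiped_spec : Claim_equal_can_form_parallelepiped := by
  intro l _
  unfold Spec_can_form_parallelepiped
  unfold can_form_parallelepiped can_form_parallelepiped_alt
  rw [pv_step_eq, PySem.Dict.foldl_insert_getD_add_one_eq_counter]
  by_cases hC : pvThreeBlocks l
  · have hA := (pv_A_yes_iff l).mpr hC
    have hB := (pv_B_yes_iff l).mpr hC
    simp only [if_pos hA, hB.1, ne_eq, not_true_eq_false, if_false, if_pos hB.2]
  · have hA : ¬ _ := fun h => hC ((pv_A_yes_iff l).mp h)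
    rw [if_neg hA]
    by_cases hlen : l.length = 12
    · have hB : ¬ _ := fun h => hC ((pv_B_yes_iff l).mp ⟨hlen, h⟩)
      simp only [hlen, ne_eq, not_true_eq_false, if_false, if_neg hB]
    · simp [hlen]
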